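-- pv_equiv track=rewrite | github.com/anniebryan/advent-of-code-19 | 2022/day3/solution.py | letter_in_common
-- ===== SOURCE A (Python) =====
-- def letter_in_common(row):
--   n = len(row)//2
--   left = set()
--   for i in range(len(row)):
--     ch = row[i]
--     if i < n:
--       left.add(ch)
--     elif ch in left:
--       return ch
-- ===== SOURCE B (Python) =====
-- def letter_in_common(row):
--   n = len(row)//2
--   second = list(row[n:])
--   best = None
--   for c in set(row[:n]):
--     if c in second:
--       j = second.index(c)
--       if best is None or j < best:
--         best = j
--   if best is not None:
--     return second[best]
-- ===== Notes on version B (the rewrite author's own statement) =====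
-- stated objective: alternative
-- what changed: Instead of A's single left-to-right scan that builds a set of the first half and returns on the first hit in the second half, B iterates over the distinct characters of the first half, computes each one's first index in the second half via list.index, and returns the second-half element at the minimum such index.
import Mathlib
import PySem

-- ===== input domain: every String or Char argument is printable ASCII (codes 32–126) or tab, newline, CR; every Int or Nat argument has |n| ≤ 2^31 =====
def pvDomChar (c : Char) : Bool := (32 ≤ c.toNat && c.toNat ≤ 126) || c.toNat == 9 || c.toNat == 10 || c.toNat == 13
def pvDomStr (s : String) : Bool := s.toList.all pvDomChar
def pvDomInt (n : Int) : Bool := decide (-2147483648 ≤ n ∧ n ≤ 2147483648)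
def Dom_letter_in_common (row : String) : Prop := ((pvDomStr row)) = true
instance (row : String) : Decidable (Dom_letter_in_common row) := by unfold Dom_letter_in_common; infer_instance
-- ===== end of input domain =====

-- B iterates over the distinct first-half characters, finds each one's first index in the
-- second half, and returns the second-half element at the minimum such index, instead of
-- A's single left-to-right scan with a growing set (objective: alternative).

-- ===== PORT A =====
-- the 'for i in range(len(row))' loop: index counter i, growing set 'left'
def pvGoA (n : Nat) : List Char → Nat → PySem.Set Char → Option String
  | [], _, _ => none
  | ch :: rest, i, left =>
    if i < n then pvGoA n rest (i+1) (PySem.Set.add left ch)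
    else if PySem.Set.contains left ch then some (String.ofList [ch])
    else pvGoA n rest (i+1) left

def letter_in_common (row : String) : Option String :=
  let n := row.toList.length / 2
  pvGoA n row.toList 0 PySem.Set.empty

-- ===== PORT B =====
-- loop body: 'if c in second: j = second.index(c); if best is None or j < best: best = j'
-- (index? combines the membership test and .index: it is none exactly when c ∉ second)
def pvStep (second : List Char) (best : Option Nat) (c : Char) : Option Nat :=
  match PySem.List.index? second c with
  | none => best
  | some j =>
    match best with
    | none => some j
    | some b => if j < b then some j else best

def letter_in_common_alt (row : String) : Option String :=
  let cs := row.toList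
  let n := cs.length / 2
  let second := cs.drop n
  let best := List.foldl (pvStep second) none (PySem.Set.ofList (cs.take n))
  match best with
  | none => none
  | some b => (PySem.List.pyGet? second (b : Int)).map (fun ch => String.ofList [ch])

-- ===== PRECONDITION & SPEC =====
def Spec_letter_in_common (row : String) (out : Option String) : Prop := out = letter_in_common_alt row
instance (row : String) (out : Option String) : Decidable (Spec_letter_in_common row out) := by unfold Spec_letter_in_common; infer_instance

-- ===== CLAIM (what is proved, stated in full; the proofs are below) =====
def Claim_equal_letter_in_common : Prop := ∀ (row : String), Dom_letter_in_common row → Spec_letter_in_common row (letter_in_common row)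

-- ===== LEMMAS AND PROOFS =====

-- proof-side canonical form: the first second-half index whose char is in the first half
def pvScan (F : List Char) : List Char → Option String
  | [] => none
  | ch :: rest => if ch ∈ F then some (String.ofList [ch]) else pvScan F rest

theorem pvContains_add (left : PySem.Set Char) (ch c : Char) :
    PySem.Set.contains (PySem.Set.add left ch) c =
      (PySem.Set.contains left c || decide (c = ch)) := by
  simp [PySem.Set.contains, PySem.Set.add]
  by_cases h : ch ∈ left <;> simp [h] <;> by_cases hc : c = ch <;> simp [hc, h]

theorem pvGoA_eq_scan (n : Nat) :
    ∀ (cs : List Char) (i : Nat) (left : PySem.Set Char) (F : List Char),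
      (∀ c, PySem.Set.contains left c = decide (c ∈ F)) →
      pvGoA n cs i left = pvScan (F ++ cs.take (n - i)) (cs.drop (n - i)) := by
  intro cs
  induction cs with
  | nil => intro i left F _; simp [pvGoA, pvScan]
  | cons ch rest ih =>
    intro i left F hF
    by_cases h : i < n
    · have hni : n - i = (n - (i+1)) + 1 := by omega
      rw [pvGoA, if_pos h, hni]
      rw [ih (i+1) (PySem.Set.add left ch) (F ++ [ch])
        (by intro c; rw [pvContains_add, hF]; simp)]
      simp [List.take, List.drop]
    · have hni : n - i = 0 := by omega
      have hni1 : n - (i+1) = 0 := by omega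
      rw [pvGoA, if_neg h, hni]
      have hmem : (ch ∈ left) ↔ (ch ∈ F) := by
        have h2 := hF ch
        simp [PySem.Set.contains] at h2
        simpa using h2
      by_cases hm : ch ∈ F
      · simp [pvScan, hm, hmem.mpr hm]
      · have hnl : ch ∉ left := fun hc => hm (hmem.mp hc)
        simp [pvScan, hm, hnl, ih (i+1) left F hF, hni1]

-- pvScan in terms of findIdx?
theorem pvScan_eq_findIdx (F : List Char) (S : List Char) :
    pvScan F S = (S.findIdx? (fun c => decide (c ∈ F))).bind
      (fun j => S[j]?.map (fun ch => String.ofList [ch])) := by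
  induction S with
  | nil => simp [pvScan]
  | cons ch rest ih =>
    by_cases hm : ch ∈ F
    · simp [pvScan, hm, List.findIdx?_cons]
    · simp [pvScan, hm, List.findIdx?_cons, ih, Option.bind_map]

-- the fold stays none when no candidate occurs in S
theorem pvFold_none (S : List Char) :
    ∀ (L : List Char), (∀ c ∈ L, PySem.List.index? S c = none) →
      List.foldl (pvStep S) none L = none := by
  intro L
  induction L with
  | nil => simp
  | cons c rest ih =>
    intro h
    simp only [List.foldl_cons, pvStep, h c (by simp)]
    exact ih (fun c' hc' => h c' (by simp [hc']))

-- the fold reaches the minimum j0 when it is achieved and is a lower bound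
theorem pvFold_reach (S : List Char) (j0 : Nat) :
    ∀ (L : List Char) (acc : Option Nat),
      (∀ c ∈ L, ∀ j, PySem.List.index? S c = some j → j0 ≤ j) →
      (∀ b, acc = some b → j0 ≤ b) →
      (acc = some j0 ∨ ∃ c ∈ L, PySem.List.index? S c = some j0) →
      List.foldl (pvStep S) acc L = some j0 := by
  intro L
  induction L with
  | nil =>
    intro acc _ _ hreach
    rcases hreach with h | ⟨c, hc, _⟩
    · simpa using h
    · exact absurd hc (by simp)
  | cons c rest ih =>
    intro acc hlb hacc hreach
    simp only [List.foldl_cons]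
    have hlb' : ∀ c' ∈ rest, ∀ j, PySem.List.index? S c' = some j → j0 ≤ j :=
      fun c' hc' => hlb c' (by simp [hc'])
    have haccstep : ∀ b, pvStep S acc c = some b → j0 ≤ b := by
      intro b hb
      unfold pvStep at hb
      cases hidx : PySem.List.index? S c with
      | none => rw [hidx] at hb; exact hacc b hb
      | some j =>
        have hj := hlb c (by simp) j hidx
        rw [hidx] at hb
        cases hacc2 : acc with
        | none => rw [hacc2] at hb; simp at hb; omega
        | some b0 =>
          have hb0 := hacc b0 hacc2
          rw [hacc2] at hb
          by_cases hlt : j < b0 <;> simp [hlt] at hb <;> omega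
    apply ih (pvStep S acc c) hlb' haccstep
    rcases hreach with h | ⟨c', hc', hidx'⟩
    · left
      unfold pvStep
      cases hidx : PySem.List.index? S c with
      | none => exact h
      | some j =>
        have hj := hlb c (by simp) j hidx
        rw [h]
        by_cases hlt : j < j0 <;> simp [hlt] <;> omega
    · rcases List.mem_cons.mp hc' with rfl | hmem
      · left
        unfold pvStep
        rw [hidx']
        cases hacc2 : acc with
        | none => rfl
        | some b0 =>
          have hb0 := hacc b0 hacc2
          by_cases hlt : j0 < b0 <;> simp [hlt] <;> omega
      · right; exact ⟨c', hmem, hidx'⟩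

-- the fold over the distinct first-half chars computes findIdx? of membership
theorem pvFold_eq_findIdx (F S : List Char) :
    List.foldl (pvStep S) none (PySem.Set.ofList F) =
      S.findIdx? (fun c => decide (c ∈ F)) := by
  rw [← PySem.List.dedup_eq_ofList]
  cases hfi : S.findIdx? (fun c => decide (c ∈ F)) with
  | none =>
    apply pvFold_none
    intro c hc
    rw [PySem.List.index?_eq_none_iff]
    intro hcS
    have := (List.findIdx?_eq_none_iff.mp hfi) c hcS
    simp at this
    exact this ((PySem.List.mem_dedup F c).mp hc)
  | some j0 =>
    obtain ⟨hlt, hp, hmin⟩ := List.findIdx?_eq_some_iff_getElem.mp hfi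
    apply pvFold_reach
    · -- lower bound
      intro c hc j hidx
      obtain ⟨hj, hgj, _⟩ := PySem.List.getElem_of_index?_eq_some hidx
      by_contra hlt2
      have := hmin j (by omega)
      simp [hgj] at this
      exact this ((PySem.List.mem_dedup F c).mp hc)
    · intro b hb; simp at hb
    · right
      refine ⟨S[j0], (PySem.List.mem_dedup F _).mpr (by simpa using hp), ?_⟩
      -- S[j0] first occurs at j0: an earlier occurrence would satisfy the predicate
      cases hidx : PySem.List.index? S S[j0] with
      | none =>
        rw [PySem.List.index?_eq_none_iff] at hidx
        exact absurd (List.getElem_mem hlt) hidx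
      | some k =>
        obtain ⟨hk, hgk, hkmin⟩ := PySem.List.getElem_of_index?_eq_some hidx
        congr 1
        by_contra hne
        rcases Nat.lt_or_ge k j0 with hklt | hkge
        · have := hmin k hklt
          simp [hgk] at this
          exact this (by simpa using hp)
        · exact hkmin j0 (by omega) rfl

-- ===== VERDICT (by name: the statement is the Claim_ definition above) =====
theorem letter_in_common_spec : Claim_equal_letter_in_common := by
  intro row _
  unfold Spec_letter_in_common letter_in_common letter_in_common_alt
  rw [pvGoA_eq_scan _ _ 0 PySem.Set.empty []
    (by intro c; simp [PySem.Set.contains, PySem.Set.empty])]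
  simp only [Nat.sub_zero, List.nil_append]
  rw [pvScan_eq_findIdx, pvFold_eq_findIdx]
  cases h : (row.toList.drop (row.toList.length / 2)).findIdx?
      (fun c => decide (c ∈ row.toList.take (row.toList.length / 2))) with
  | none => simp
  | some j0 => simp [PySem.List.pyGet?_natCast]
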